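-- pv_equiv track=rewrite | github.com/DiStanceQAQ/personal_ai_paper | pdf_backend_docling.py | _element_type
-- ===== SOURCE A (Python) =====
-- def _element_type(label: str) -> str:
--     if any(token in label for token in ("heading", "header", "section", "title")):
--         return "heading"
--     if "table" in label:
--         return "table"
--     if any(token in label for token in ("picture", "figure", "image")):
--         return "figure"
--     if "caption" in label:
--         return "caption"
--     if any(token in label for token in ("formula", "equation")):
--         return "equation"
--     if "code" in label:
--         return "code"
--     if "list" in label:
--         return "list"
--     return "paragraph"
-- ===== SOURCE B (Python) =====
-- _KIND_OF = {
--     "heading": "heading", "header": "heading", "section": "heading", "title": "heading",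
--     "table": "table",
--     "picture": "figure", "figure": "figure", "image": "figure",
--     "caption": "caption",
--     "formula": "equation", "equation": "equation",
--     "code": "code",
--     "list": "list",
-- }
-- _PRIORITY = ("heading", "table", "figure", "caption", "equation", "code", "list", "paragraph")
--
--
-- def _element_type(label: str) -> str:
--     # Collect ALL kinds whose token occurs, then pick the highest-priority one.
--     hits = {kind for token, kind in _KIND_OF.items() if token in label}
--     hits.add("paragraph")
--     return min(hits, key=_PRIORITY.index)
-- ===== Notes on version B (the rewrite author's own statement) =====
-- stated objective: alternative
-- what changed: Instead of an ordered first-match if-chain, B collects the SET of all kinds whose token occurs anywhere in the label and then selects the highest-priority kind via min(hits, key=_PRIORITY.index); correct because the chain's order equals the priority order.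
import Mathlib
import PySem

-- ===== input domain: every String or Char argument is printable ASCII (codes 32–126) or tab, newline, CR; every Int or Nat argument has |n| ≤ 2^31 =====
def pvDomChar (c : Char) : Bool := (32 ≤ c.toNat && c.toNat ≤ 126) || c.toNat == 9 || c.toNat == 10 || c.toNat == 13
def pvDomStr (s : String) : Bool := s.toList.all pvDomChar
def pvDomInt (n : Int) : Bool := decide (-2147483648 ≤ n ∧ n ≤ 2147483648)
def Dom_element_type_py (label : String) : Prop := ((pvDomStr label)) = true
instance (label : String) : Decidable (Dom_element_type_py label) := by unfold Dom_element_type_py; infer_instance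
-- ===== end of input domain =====

-- B collects the set of ALL matched kinds and picks the highest-priority one with min(·, key=priority index), instead of A's ordered first-match if-chain (alternative decomposition; same value).

-- ===== PORT A =====
def element_type_py (label : String) : String :=
  if PySem.Str.isIn "heading" label || PySem.Str.isIn "header" label ||
     PySem.Str.isIn "section" label || PySem.Str.isIn "title" label then "heading"
  else if PySem.Str.isIn "table" label then "table"
  else if PySem.Str.isIn "picture" label || PySem.Str.isIn "figure" label ||
          PySem.Str.isIn "image" label then "figure"
  else if PySem.Str.isIn "caption" label then "caption"
  else if PySem.Str.isIn "formula" label || PySem.Str.isIn "equation" label then "equation"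
  else if PySem.Str.isIn "code" label then "code"
  else if PySem.Str.isIn "list" label then "list"
  else "paragraph"

-- ===== PORT B =====
def etKindOf : List (String × String) :=
  [ ("heading", "heading"), ("header", "heading"), ("section", "heading"), ("title", "heading"),
    ("table", "table"),
    ("picture", "figure"), ("figure", "figure"), ("image", "figure"),
    ("caption", "caption"),
    ("formula", "equation"), ("equation", "equation"),
    ("code", "code"),
    ("list", "list") ]

def etPriority : List String :=
  ["heading", "table", "figure", "caption", "equation", "code", "list", "paragraph"]

-- _PRIORITY.index; every string min applies it to is in etPriority, so the `.getD 0`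
-- never papers over Python's raising case on a reachable argument
def etIdx (s : String) : Nat := (PySem.List.index? etPriority s).getD 0

def element_type_py_alt (label : String) : String :=
  let hits : PySem.Set String :=
    PySem.Set.ofList ((etKindOf.filter (fun p => PySem.Str.isIn p.1 label)).map Prod.snd)
  let hits := PySem.Set.add hits "paragraph"
  PySem.List.minD hits etIdx ""   -- min(hits, key=_PRIORITY.index); hits is nonempty

-- ===== PRECONDITION & SPEC =====
def Spec_element_type_py (label : String) (out : String) : Prop := out = element_type_py_alt label
instance (label : String) (out : String) : Decidable (Spec_element_type_py label out) := by unfold Spec_element_type_py; infer_instance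

-- ===== CLAIM =====
def Claim_equal_element_type_py : Prop := ∀ (label : String), Dom_element_type_py label → Spec_element_type_py label (element_type_py label)

-- ===== LEMMAS AND PROOFS =====

-- B's hits set, as a plain term (for stating the helper lemmas)
def etHits (label : String) : List String :=
  PySem.Set.add
    (PySem.Set.ofList ((etKindOf.filter (fun p => PySem.Str.isIn p.1 label)).map Prod.snd))
    "paragraph"

-- min with key returns a when a is in the list and strictly key-below every other member
theorem pv_minD_eq {α κ : Type} [LinearOrder κ] (xs : List α) (key : α → κ) (d a : α)
    (ha : a ∈ xs) (hs : ∀ y ∈ xs, y ≠ a → key a < key y) :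
    PySem.List.minD xs key d = a := by
  have hne : xs ≠ [] := List.ne_nil_of_mem ha
  obtain ⟨m, hm⟩ : ∃ m, PySem.List.min? xs key = some m := by
    cases h : PySem.List.min? xs key with
    | none => exact absurd ((PySem.List.min?_eq_none_iff _ _).1 h) hne
    | some m => exact ⟨m, rfl⟩
  have hmem := PySem.List.min?_mem hm
  have hmin := PySem.List.min?_isMin hm a ha
  by_cases hma : m = a
  · simp [PySem.List.minD, hm, hma]
  · exact absurd (hs m hmem hma) (not_lt.2 hmin)

theorem etHits_mem_tok (label : String) (p : String × String) (hp : p ∈ etKindOf)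
    (hc : PySem.Str.isIn p.1 label = true) : p.2 ∈ etHits label := by
  unfold etHits
  rw [PySem.Set.mem_add, PySem.Set.mem_ofList]
  exact Or.inl (List.mem_map.2 ⟨p, List.mem_filter.2 ⟨hp, hc⟩, rfl⟩)

theorem etHits_dom (label K : String) (hidx : etIdx K < 7)
    (hko : ∀ p ∈ etKindOf, PySem.Str.isIn p.1 label = true → p.2 ≠ K → etIdx K < etIdx p.2) :
    ∀ y ∈ etHits label, y ≠ K → etIdx K < etIdx y := by
  intro y hy hne
  unfold etHits at hy
  rw [PySem.Set.mem_add, PySem.Set.mem_ofList] at hy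
  rcases hy with hy | rfl
  · rcases List.mem_map.1 hy with ⟨p, hp, rfl⟩
    rcases List.mem_filter.1 hp with ⟨hmem, hcond⟩
    by_cases hk : p.2 = K
    · exact absurd hk hne
    · exact hko p hmem hcond hk
  · have h7 : etIdx "paragraph" = 7 := by decide
    omega

theorem alt_eq (label a : String) (ha : a ∈ etHits label)
    (hs : ∀ y ∈ etHits label, y ≠ a → etIdx a < etIdx y) :
    element_type_py_alt label = a := by
  unfold element_type_py_alt
  exact pv_minD_eq _ _ _ _ ha hs

-- ===== VERDICT =====
theorem element_type_py_spec : Claim_equal_element_type_py := by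
  intro label _
  unfold Spec_element_type_py element_type_py
  split_ifs with h1 h2 h3 h4 h5 h6 h7
  all_goals simp only [Bool.or_eq_true, not_or, Bool.not_eq_true] at *
  -- heading
  · refine (alt_eq label "heading" ?_ (etHits_dom _ _ (by decide) ?_)).symm
    · rcases h1 with ((h | h) | h) | h
      · exact etHits_mem_tok label ("heading", "heading") (by decide) h
      · exact etHits_mem_tok label ("header", "heading") (by decide) h
      · exact etHits_mem_tok label ("section", "heading") (by decide) h
      · exact etHits_mem_tok label ("title", "heading") (by decide) h
    · intro p hp hc hne
      simp only [etKindOf, List.mem_cons, List.not_mem_nil, or_false] at hp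
      rcases hp with rfl|rfl|rfl|rfl|rfl|rfl|rfl|rfl|rfl|rfl|rfl|rfl|rfl <;>
        first | decide | simp_all
  -- table
  · refine (alt_eq label "table" ?_ (etHits_dom _ _ (by decide) ?_)).symm
    · exact etHits_mem_tok label ("table", "table") (by decide) h2
    · intro p hp hc hne
      simp only [etKindOf, List.mem_cons, List.not_mem_nil, or_false] at hp
      rcases hp with rfl|rfl|rfl|rfl|rfl|rfl|rfl|rfl|rfl|rfl|rfl|rfl|rfl <;>
        first | decide | simp_all
  -- figure
  · refine (alt_eq label "figure" ?_ (etHits_dom _ _ (by decide) ?_)).symm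
    · rcases h3 with (h | h) | h
      · exact etHits_mem_tok label ("picture", "figure") (by decide) h
      · exact etHits_mem_tok label ("figure", "figure") (by decide) h
      · exact etHits_mem_tok label ("image", "figure") (by decide) h
    · intro p hp hc hne
      simp only [etKindOf, List.mem_cons, List.not_mem_nil, or_false] at hp
      rcases hp with rfl|rfl|rfl|rfl|rfl|rfl|rfl|rfl|rfl|rfl|rfl|rfl|rfl <;>
        first | decide | simp_all
  -- caption
  · refine (alt_eq label "caption" ?_ (etHits_dom _ _ (by decide) ?_)).symm
    · exact etHits_mem_tok label ("caption", "caption") (by decide) h4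
    · intro p hp hc hne
      simp only [etKindOf, List.mem_cons, List.not_mem_nil, or_false] at hp
      rcases hp with rfl|rfl|rfl|rfl|rfl|rfl|rfl|rfl|rfl|rfl|rfl|rfl|rfl <;>
        first | decide | simp_all
  -- equation
  · refine (alt_eq label "equation" ?_ (etHits_dom _ _ (by decide) ?_)).symm
    · rcases h5 with h | h
      · exact etHits_mem_tok label ("formula", "equation") (by decide) h
      · exact etHits_mem_tok label ("equation", "equation") (by decide) h
    · intro p hp hc hne
      simp only [etKindOf, List.mem_cons, List.not_mem_nil, or_false] at hp
      rcases hp with rfl|rfl|rfl|rfl|rfl|rfl|rfl|rfl|rfl|rfl|rfl|rfl|rfl <;>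
        first | decide | simp_all
  -- code
  · refine (alt_eq label "code" ?_ (etHits_dom _ _ (by decide) ?_)).symm
    · exact etHits_mem_tok label ("code", "code") (by decide) h6
    · intro p hp hc hne
      simp only [etKindOf, List.mem_cons, List.not_mem_nil, or_false] at hp
      rcases hp with rfl|rfl|rfl|rfl|rfl|rfl|rfl|rfl|rfl|rfl|rfl|rfl|rfl <;>
        first | decide | simp_all
  -- list
  · refine (alt_eq label "list" ?_ (etHits_dom _ _ (by decide) ?_)).symm
    · exact etHits_mem_tok label ("list", "list") (by decide) h7
    · intro p hp hc hne
      simp only [etKindOf, List.mem_cons, List.not_mem_nil, or_false] at hp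
      rcases hp with rfl|rfl|rfl|rfl|rfl|rfl|rfl|rfl|rfl|rfl|rfl|rfl|rfl <;>
        first | decide | simp_all
  -- paragraph: nothing matched, the filter is empty
  · unfold element_type_py_alt etKindOf
    simp only [List.filter_cons, List.filter_nil, h1.1.1.1, h1.1.1.2, h1.1.2, h1.2, h2,
      h3.1.1, h3.1.2, h3.2, h4, h5.1, h5.2, h6, h7, Bool.false_eq_true]
    decide
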